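-- pv_equiv track=rewrite | github.com/nmlemus/aiuda-planner-agent | src/dsagent/utils/notebook.py | _remove_imports
-- ===== SOURCE A (Python) =====
-- def _remove_imports(code: str) -> str:
--     """Remove import statements from code.
--
--     Args:
--         code: Python code
--
--     Returns:
--         Code with imports removed
--     """
--     lines = []
--     for line in code.split("\n"):
--         stripped = line.strip()
--         if stripped.startswith("import ") or stripped.startswith("from "):
--             continue
--         lines.append(line)
--     # Remove leading empty lines
--     while lines and not lines[0].strip():
--         lines.pop(0)
--     return "\n".join(lines)
-- ===== SOURCE B (Python) =====
-- def _remove_imports(code: str) -> str: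
--     """Remove import statements from code (single streaming pass)."""
--     out = []
--     started = False
--     for line in code.split("\n"):
--         stripped = line.strip()
--         if stripped.startswith("import ") or stripped.startswith("from "):
--             continue
--         if not started and not stripped:
--             continue
--         started = True
--         out.append(line)
--     return "\n".join(out)
-- ===== Notes on version B (the rewrite author's own statement) =====
-- stated objective: simpler
-- what changed: Replaced A's two-phase structure (filter out import lines into a list, then a while-loop popping leading blank lines) with a single streaming pass over the lines that keeps a boolean start flag and skips leading blanks inline.
import Mathlib
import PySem

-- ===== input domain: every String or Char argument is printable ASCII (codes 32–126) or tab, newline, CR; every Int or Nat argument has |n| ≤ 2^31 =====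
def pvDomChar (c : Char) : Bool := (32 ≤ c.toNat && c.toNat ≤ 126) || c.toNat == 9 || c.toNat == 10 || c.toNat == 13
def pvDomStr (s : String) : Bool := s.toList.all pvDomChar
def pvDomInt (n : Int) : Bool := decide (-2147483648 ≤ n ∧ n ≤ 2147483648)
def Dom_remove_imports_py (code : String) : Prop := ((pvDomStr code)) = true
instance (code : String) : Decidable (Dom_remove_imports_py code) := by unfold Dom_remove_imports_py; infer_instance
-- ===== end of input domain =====

-- B replaces A's two-phase filter-then-pop-leading-blanks structure with one streaming
-- pass over the lines keeping a boolean start flag (simpler decomposition, same cost).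

-- ===== PORT A =====
-- line is kept unless its stripped form starts with "import " or "from "
def pvIsImport (line : List Char) : Bool :=
  let stripped := PySem.Chars.strip line
  PySem.Chars.startswith stripped "import ".toList || PySem.Chars.startswith stripped "from ".toList

-- A's 'while lines and not lines[0].strip(): lines.pop(0)'
def pvPopLeadingBlanks : List (List Char) → List (List Char)
  | [] => []
  | l :: ls => if PySem.Chars.strip l = [] then pvPopLeadingBlanks ls else l :: ls

def remove_imports_py (code : String) : String :=
  let lines := (PySem.Chars.splitOn code.toList ['\n']).foldl
    (fun acc line => if pvIsImport line then acc else acc ++ [line]) []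
  String.ofList (PySem.Chars.join ['\n'] (pvPopLeadingBlanks lines))

-- ===== PORT B =====
-- one pass: state = (start flag, collected lines)
def pvStepB (st : Bool × List (List Char)) (line : List Char) : Bool × List (List Char) :=
  let stripped := PySem.Chars.strip line
  if PySem.Chars.startswith stripped "import ".toList || PySem.Chars.startswith stripped "from ".toList then st
  else if !st.1 && stripped = [] then st
  else (true, st.2 ++ [line])

def remove_imports_py_alt (code : String) : String :=
  String.ofList (PySem.Chars.join ['\n']
    ((PySem.Chars.splitOn code.toList ['\n']).foldl pvStepB (false, [])).2)

-- ===== PRECONDITION & SPEC =====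
def Spec_remove_imports_py (code : String) (out : String) : Prop := out = remove_imports_py_alt code
instance (code : String) (out : String) : Decidable (Spec_remove_imports_py code out) := by unfold Spec_remove_imports_py; infer_instance

-- ===== CLAIM (what is proved, stated in full; the proofs are below) =====
def Claim_equal_remove_imports_py : Prop := ∀ (code : String), Dom_remove_imports_py code → Spec_remove_imports_py code (remove_imports_py code)

-- ===== LEMMAS AND PROOFS =====

-- B's step written through pvIsImport (definitional)
theorem pvStepB_eq (st : Bool × List (List Char)) (l : List Char) :
    pvStepB st l = if pvIsImport l then st
      else if !st.1 && PySem.Chars.strip l = [] then st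
      else (true, st.2 ++ [l]) := rfl

-- once started, B keeps exactly the non-import lines, appended to the accumulator
theorem pvStepB_started (ls : List (List Char)) (acc : List (List Char)) :
    ls.foldl pvStepB (true, acc) = (true, acc ++ ls.filter (fun l => !pvIsImport l)) := by
  induction ls generalizing acc with
  | nil => simp
  | cons l ls ih =>
    rw [List.foldl_cons, pvStepB_eq]
    by_cases h : pvIsImport l = true <;> simp [h, ih]

-- before starting, B computes A's pop-leading-blanks of the filtered list
theorem pvStepB_unstarted (ls : List (List Char)) :
    (ls.foldl pvStepB (false, [])).2 =
      pvPopLeadingBlanks (ls.filter (fun l => !pvIsImport l)) := by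
  induction ls with
  | nil => simp [pvPopLeadingBlanks]
  | cons l ls ih =>
    rw [List.foldl_cons, pvStepB_eq]
    by_cases h : pvIsImport l = true
    · simp [h, ih]
    · by_cases hb : PySem.Chars.strip l = []
      · simp [h, hb, ih, pvPopLeadingBlanks]
      · simp [h, hb, pvStepB_started, pvPopLeadingBlanks]

-- ===== VERDICT (by name: the statement is the Claim_ definition above) =====
theorem remove_imports_py_spec : Claim_equal_remove_imports_py := by
  intro code _
  unfold Spec_remove_imports_py remove_imports_py remove_imports_py_alt
  have hf : (fun (acc : List (List Char)) line => if pvIsImport line = true then acc else acc ++ [line])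
      = (fun acc x => if (!pvIsImport x) = true then acc ++ [id x] else acc) := by
    funext acc line; by_cases h : pvIsImport line <;> simp [h]
  rw [pvStepB_unstarted, hf, PySem.List.foldl_append_if, List.map_id]
  simp
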